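-- pv_equiv track=rewrite | github.com/Shehwaz81/WRO-International | Old Versions/WROSenior2025_Slow_05_17.py | find_rotation_sequence
-- ===== SOURCE A (Python) =====
-- def rotate_square(square):
--     return [square[2], square[0], square[3], square[1]]
--
-- def rotate_square_ccw(square):
--     return [square[1], square[3], square[0], square[2]]
--
-- def rotate_square_180(square):
--     return [square[3], square[2], square[1], square[0]]
--
-- def rotate_back_row(square):
--     return [square[1], square[0], square[2], square[3]]
--
-- def find_rotation_sequence(start, goal_bl, goal_br):
--     visited = []
--     queue = [(start, [])]
--     while queue:
--         current, moves = queue.pop(0)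
--         key = tuple(current)
--
--         if key in visited:
--             continue
--         visited.append(key)
--
--         if current[0] == goal_bl and current[1] == goal_br:
--             return moves, current
--
--         queue.append((rotate_square(current), moves + ['cw']))  # 1: Rotate Square CW
--         queue.append((rotate_square_ccw(current), moves + ['ccw']))  # 2: Rotate Square CCW
--         queue.append((rotate_square_180(current), moves + ['180']))  # 3: Rotate Square 180
--         queue.append((rotate_back_row(current), moves + ['br']))  # 4: Rotate Back Row
-- ===== SOURCE B (Python) =====
-- # The four rotations act on cell POSITIONS only, so the whole search is input-independent:
-- # the table below is the group of 24 index-permutations they generate, listed once and for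
-- # all in the exact discovery order of a breadth-first search from the identity, each with
-- # its move sequence.  A query is then a single scan of this fixed table.  No visited set is
-- # needed: two table entries that yield equal squares yield the same goal-test outcome, and
-- # the earlier entry is checked first.
-- _SEQUENCE = [
--     ([0, 1, 2, 3], []),
--     ([2, 0, 3, 1], ['cw']),
--     ([1, 3, 0, 2], ['ccw']),
--     ([3, 2, 1, 0], ['180']),
--     ([1, 0, 2, 3], ['br']),
--     ([0, 2, 3, 1], ['cw', 'br']),
--     ([3, 1, 0, 2], ['ccw', 'br']),
--     ([2, 3, 1, 0], ['180', 'br']),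
--     ([2, 1, 3, 0], ['br', 'cw']),
--     ([0, 3, 1, 2], ['br', 'ccw']),
--     ([3, 2, 0, 1], ['br', '180']),
--     ([3, 0, 1, 2], ['cw', 'br', 'cw']),
--     ([2, 1, 0, 3], ['cw', 'br', 'ccw']),
--     ([1, 3, 2, 0], ['cw', 'br', '180']),
--     ([0, 3, 2, 1], ['ccw', 'br', 'cw']),
--     ([1, 2, 3, 0], ['ccw', 'br', 'ccw']),
--     ([2, 0, 1, 3], ['ccw', 'br', '180']),
--     ([1, 2, 0, 3], ['180', 'br', 'cw']),
--     ([3, 0, 2, 1], ['180', 'br', 'ccw']),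
--     ([0, 1, 3, 2], ['180', 'br', '180']),
--     ([2, 3, 0, 1], ['br', '180', 'br']),
--     ([3, 1, 2, 0], ['cw', 'br', '180', 'br']),
--     ([0, 2, 1, 3], ['ccw', 'br', '180', 'br']),
--     ([1, 0, 3, 2], ['180', 'br', '180', 'br']),
-- ]
--
-- def find_rotation_sequence(start, goal_bl, goal_br):
--     for perm, moves in _SEQUENCE:
--         square = [start[i] for i in perm]
--         if square[0] == goal_bl and square[1] == goal_br:
--             return moves, square
-- ===== Notes on version B (the rewrite author's own statement) =====
-- stated objective: alternative
-- what changed: The BFS is input-independent (the four rotations only permute cell positions), so B replaces the whole search by a precomputed constant table of the 24 index-permutations in BFS discovery order with their move sequences and answers each query by one linear scan of that table (no queue, no visited set).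
-- intended difference: On lists longer than 4 cells whose first two cells already match the goal, A returns the whole oversized input list as the square while B returns the 4-cell square [start[0],start[1],start[2],start[3]]; the function manipulates 4-cell squares (every other value A returns is 4 cells), so B's value is the intended one. — e.g. on find_rotation_sequence([1, 2, 3, 4, 5], 1, 2): A returns some ([], [1, 2, 3, 4, 5]), B returns some ([], [1, 2, 3, 4])
-- outside the precondition, e.g. on find_rotation_sequence([1, 2], 1, 2): A returns ([], [1, 2]), B raises IndexError
import Mathlib
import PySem

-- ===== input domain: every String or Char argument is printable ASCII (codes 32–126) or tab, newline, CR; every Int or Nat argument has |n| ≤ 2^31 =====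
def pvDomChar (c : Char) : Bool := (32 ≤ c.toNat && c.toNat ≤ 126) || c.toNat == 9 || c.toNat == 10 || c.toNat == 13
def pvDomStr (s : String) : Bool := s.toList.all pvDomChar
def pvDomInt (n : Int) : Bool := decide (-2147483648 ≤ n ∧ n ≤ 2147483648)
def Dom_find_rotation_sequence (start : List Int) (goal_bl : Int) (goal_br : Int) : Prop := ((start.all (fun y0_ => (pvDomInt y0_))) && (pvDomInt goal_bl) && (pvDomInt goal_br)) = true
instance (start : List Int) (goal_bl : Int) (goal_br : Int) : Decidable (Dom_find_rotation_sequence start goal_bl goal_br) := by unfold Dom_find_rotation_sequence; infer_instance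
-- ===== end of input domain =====

-- B replaces A's breadth-first search by a precomputed constant table: the four rotations
-- only permute cell positions, so the 24 index-permutations they generate are listed once
-- in BFS discovery order with their move sequences, and a query is one scan of that table
-- (objective: alternative — no queue, no pop(0) shifting, no visited set).

-- ===== PORT A =====
-- rotation helpers of Source A; exact where all indices 0..3 are in range (.getD 0 is reached
-- only outside Pre_, where the Python raises IndexError)
def rot_cw (square : List Int) : List Int :=
  [(PySem.List.pyGet? square 2).getD 0, (PySem.List.pyGet? square 0).getD 0,
   (PySem.List.pyGet? square 3).getD 0, (PySem.List.pyGet? square 1).getD 0]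
def rot_ccw (square : List Int) : List Int :=
  [(PySem.List.pyGet? square 1).getD 0, (PySem.List.pyGet? square 3).getD 0,
   (PySem.List.pyGet? square 0).getD 0, (PySem.List.pyGet? square 2).getD 0]
def rot_180 (square : List Int) : List Int :=
  [(PySem.List.pyGet? square 3).getD 0, (PySem.List.pyGet? square 2).getD 0,
   (PySem.List.pyGet? square 1).getD 0, (PySem.List.pyGet? square 0).getD 0]
def rot_br (square : List Int) : List Int :=
  [(PySem.List.pyGet? square 1).getD 0, (PySem.List.pyGet? square 0).getD 0,
   (PySem.List.pyGet? square 2).getD 0, (PySem.List.pyGet? square 3).getD 0]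

-- A's while loop: one FIFO queue, pop(0) at the front, four appends at the back.
-- Fuel 1000: each pop costs one unit; on inputs of Pre_ the run makes at most
-- 1 + 4*24 = 97 pops (at most 24 distinct squares exist), so the guard never fires there.
def aloop : Nat → List (List Int) → List (List Int × List String) → Int → Int → Option (List String × List Int)
  | 0, _, _, _, _ => none
  | _ + 1, _, [], _, _ => none
  | fuel + 1, visited, (current, moves) :: rest, gbl, gbr =>
    if current ∈ visited then
      aloop fuel visited rest gbl gbr
    else
      if (PySem.List.pyGet? current 0 == some gbl) && (PySem.List.pyGet? current 1 == some gbr) then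
        some (moves, current)
      else
        aloop fuel (visited ++ [current])
          ((((rest ++ [(rot_cw current, moves ++ ["cw"])])
                  ++ [(rot_ccw current, moves ++ ["ccw"])])
                  ++ [(rot_180 current, moves ++ ["180"])])
                  ++ [(rot_br current, moves ++ ["br"])]) gbl gbr

def find_rotation_sequence (start : List Int) (goal_bl : Int) (goal_br : Int) : Option (List String × List Int) :=
  aloop 1000 [] [(start, [])] goal_bl goal_br

-- ===== PORT B =====
-- Source B's constant _SEQUENCE: the 24 index-permutations in BFS discovery order
def bTable : List (List Nat × List String) :=
  [([0, 1, 2, 3], []),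
   ([2, 0, 3, 1], ["cw"]),
   ([1, 3, 0, 2], ["ccw"]),
   ([3, 2, 1, 0], ["180"]),
   ([1, 0, 2, 3], ["br"]),
   ([0, 2, 3, 1], ["cw", "br"]),
   ([3, 1, 0, 2], ["ccw", "br"]),
   ([2, 3, 1, 0], ["180", "br"]),
   ([2, 1, 3, 0], ["br", "cw"]),
   ([0, 3, 1, 2], ["br", "ccw"]),
   ([3, 2, 0, 1], ["br", "180"]),
   ([3, 0, 1, 2], ["cw", "br", "cw"]),
   ([2, 1, 0, 3], ["cw", "br", "ccw"]),
   ([1, 3, 2, 0], ["cw", "br", "180"]),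
   ([0, 3, 2, 1], ["ccw", "br", "cw"]),
   ([1, 2, 3, 0], ["ccw", "br", "ccw"]),
   ([2, 0, 1, 3], ["ccw", "br", "180"]),
   ([1, 2, 0, 3], ["180", "br", "cw"]),
   ([3, 0, 2, 1], ["180", "br", "ccw"]),
   ([0, 1, 3, 2], ["180", "br", "180"]),
   ([2, 3, 0, 1], ["br", "180", "br"]),
   ([3, 1, 2, 0], ["cw", "br", "180", "br"]),
   ([0, 2, 1, 3], ["ccw", "br", "180", "br"]),
   ([1, 0, 3, 2], ["180", "br", "180", "br"])]

-- Source B's for-loop over _SEQUENCE (square built by indexing start; .getD 0 only outside Pre_)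
def bscan : List (List Nat × List String) → List Int → Int → Int → Option (List String × List Int)
  | [], _, _, _ => none
  | (perm, moves) :: rest, start, g1, g2 =>
    let square := perm.map (fun i => (PySem.List.pyGet? start (Int.ofNat i)).getD 0)
    if (PySem.List.pyGet? square 0 == some g1) && (PySem.List.pyGet? square 1 == some g2) then
      some (moves, square)
    else
      bscan rest start g1 g2

def find_rotation_sequence_alt (start : List Int) (goal_bl : Int) (goal_br : Int) : Option (List String × List Int) :=
  bscan bTable start goal_bl goal_br

-- ===== PRECONDITION & SPEC =====
-- Pre_ excludes lists shorter than 4 cells: there Python A raises IndexError in the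
-- rotation helpers, except when the goal matches immediately on a 2- or 3-cell list,
-- where A returns the short list while B's table application itself raises IndexError.
def Pre_find_rotation_sequence (start : List Int) (goal_bl : Int) (goal_br : Int) : Prop :=
  4 ≤ start.length
instance (start : List Int) (goal_bl : Int) (goal_br : Int) : Decidable (Pre_find_rotation_sequence start goal_bl goal_br) := by
  unfold Pre_find_rotation_sequence; infer_instance

def pvWitness_find_rotation_sequence : List Int × Int × Int := ([1, 2, 3, 4], 3, 1)

-- On lists longer than 4 cells whose first two cells already match the goal, A returns the
-- whole oversized input list as the square while B returns the 4-cell square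
-- [start[0],start[1],start[2],start[3]]; the function manipulates 4-cell squares (every
-- other value A returns is 4 cells), so B's value is the intended one.
def D_find_rotation_sequence (start : List Int) (goal_bl : Int) (goal_br : Int) : Prop :=
  4 < start.length ∧ PySem.List.pyGet? start 0 = some goal_bl ∧ PySem.List.pyGet? start 1 = some goal_br
instance (start : List Int) (goal_bl : Int) (goal_br : Int) : Decidable (D_find_rotation_sequence start goal_bl goal_br) := by
  unfold D_find_rotation_sequence; infer_instance

def Spec_find_rotation_sequence (start : List Int) (goal_bl : Int) (goal_br : Int) (out : Option (List String × List Int)) : Prop := ¬ D_find_rotation_sequence start goal_bl goal_br → out = find_rotation_sequence_alt start goal_bl goal_br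
instance (start : List Int) (goal_bl : Int) (goal_br : Int) (out : Option (List String × List Int)) : Decidable (Spec_find_rotation_sequence start goal_bl goal_br out) := by unfold Spec_find_rotation_sequence; infer_instance

def pvDiffWitness_find_rotation_sequence : List Int × Int × Int := ([1, 2, 3, 4, 5], 1, 2)
def pvDiffWitnessOut_find_rotation_sequence : (Option (List String × List Int)) × (Option (List String × List Int)) :=
  (some ([], [1, 2, 3, 4, 5]), some ([], [1, 2, 3, 4]))

-- ===== CLAIM (what is proved, stated in full; the proofs are below) =====
def Claim_unchanged_find_rotation_sequence : Prop := ∀ (start : List Int) (goal_bl : Int) (goal_br : Int), Dom_find_rotation_sequence start goal_bl goal_br → Pre_find_rotation_sequence start goal_bl goal_br → Spec_find_rotation_sequence start goal_bl goal_br (find_rotation_sequence start goal_bl goal_br)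
def Claim_changed_find_rotation_sequence : Prop := Dom_find_rotation_sequence (pvDiffWitness_find_rotation_sequence.1) (pvDiffWitness_find_rotation_sequence.2.1) (pvDiffWitness_find_rotation_sequence.2.2) ∧ Pre_find_rotation_sequence (pvDiffWitness_find_rotation_sequence.1) (pvDiffWitness_find_rotation_sequence.2.1) (pvDiffWitness_find_rotation_sequence.2.2) ∧ D_find_rotation_sequence (pvDiffWitness_find_rotation_sequence.1) (pvDiffWitness_find_rotation_sequence.2.1) (pvDiffWitness_find_rotation_sequence.2.2) ∧ find_rotation_sequence (pvDiffWitness_find_rotation_sequence.1) (pvDiffWitness_find_rotation_sequence.2.1) (pvDiffWitness_find_rotation_sequence.2.2) = pvDiffWitnessOut_find_rotation_sequence.1 ∧ find_rotation_sequence_alt (pvDiffWitness_find_rotation_sequence.1) (pvDiffWitness_find_rotation_sequence.2.1) (pvDiffWitness_find_rotation_sequence.2.2) = pvDiffWitnessOut_find_rotation_sequence.2 ∧ pvDiffWitnessOut_find_rotation_sequence.1 ≠ pvDiffWitnessOut_find_rotation_sequence.2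
def Claim_exact_find_rotation_sequence : Prop := ∀ (start : List Int) (goal_bl : Int) (goal_br : Int), Dom_find_rotation_sequence start goal_bl goal_br → Pre_find_rotation_sequence start goal_bl goal_br → D_find_rotation_sequence start goal_bl goal_br → find_rotation_sequence start goal_bl goal_br ≠ find_rotation_sequence_alt start goal_bl goal_br

-- ===== LEMMAS AND PROOFS =====

-- Both runs compare values only for EQUALITY, so the result depends on the input's
-- equality pattern alone.  Strategy: (1) a finite 'decide' establishes A = B for every
-- canonical pattern (values = first-occurrence indices, so component i is < i+1);
-- (2) a renaming lemma for each loop transports this to arbitrary integers via any map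
-- injective on the occurring values; (3) lists longer than 4 cells are reduced to the
-- 4-cell case (their tail is read only by the initial goal test, which D_ covers).

-- one canonical check: A vs B from the top (length-4 start), and - for the length > 4
-- case, where A's initial visited entry is the oversized start and thus never matched
-- again - A vs B from after the first expansion, with empty visited
def pvCheck (a b c d e f : Int) : Bool :=
  (aloop 1000 [] [([a, b, c, d], [])] e f == bscan bTable [a, b, c, d] e f)
  && (if (a == e) && (b == f) then true
      else
        aloop 999 [] [(rot_cw [a, b, c, d], ["cw"]), (rot_ccw [a, b, c, d], ["ccw"]),
                      (rot_180 [a, b, c, d], ["180"]), (rot_br [a, b, c, d], ["br"])] e f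
          == bscan (bTable.drop 1) [a, b, c, d] e f)

theorem pvCheck_all :
    ((List.range 1).all fun a => (List.range 2).all fun b => (List.range 3).all fun c =>
     (List.range 4).all fun d => (List.range 5).all fun e => (List.range 6).all fun f =>
       pvCheck a b c d e f) = true := by decide

theorem list_len4 {α : Type} (l : List α) (h : l.length = 4) :
    ∃ a b c d, l = [a, b, c, d] := by
  match l, h with
  | [a, b, c, d], _ => exact ⟨a, b, c, d, rfl⟩

theorem map_inj_on (f : Int → Int) (S : List Int)
    (hf : ∀ x ∈ S, ∀ y ∈ S, f x = f y → x = y) :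
    ∀ (xs ys : List Int), (∀ x ∈ xs, x ∈ S) → (∀ y ∈ ys, y ∈ S) →
      xs.map f = ys.map f → xs = ys := by
  intro xs
  induction xs with
  | nil => intro ys _ _ h; cases ys <;> simp_all
  | cons x xs ih =>
    intro ys hx hy h
    cases ys with
    | nil => simp_all
    | cons y ys =>
      simp only [List.map_cons, List.cons.injEq] at h ⊢
      refine ⟨hf x (hx x (by simp)) y (hy y (by simp)) h.1, ih ys (fun z hz => hx z (by simp [hz])) (fun z hz => hy z (by simp [hz])) h.2⟩

theorem pyGet_small (y0 y1 y2 y3 : Int) (r : List Int) (i : Nat) (h : i < 4) :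
    PySem.List.pyGet? (y0 :: y1 :: y2 :: y3 :: r) (Int.ofNat i)
      = PySem.List.pyGet? ([y0, y1, y2, y3] : List Int) (Int.ofNat i) := by
  rw [show Int.ofNat i = (i : Int) from rfl]
  rw [PySem.List.pyGet?_natCast, PySem.List.pyGet?_natCast]
  interval_cases i <;> rfl

theorem bscan_tail_irrel :
    ∀ (tbl : List (List Nat × List String)), (∀ p ∈ tbl, ∀ i ∈ p.1, i < 4) →
    ∀ (y0 y1 y2 y3 : Int) (r : List Int) (g1 g2 : Int),
      bscan tbl (y0 :: y1 :: y2 :: y3 :: r) g1 g2 = bscan tbl [y0, y1, y2, y3] g1 g2 := by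
  intro tbl htbl
  induction tbl with
  | nil => intro _ _ _ _ _ _ _; rfl
  | cons p rest ih =>
    intro y0 y1 y2 y3 r g1 g2
    obtain ⟨perm, moves⟩ := p
    have hsq : perm.map (fun i => (PySem.List.pyGet? (y0 :: y1 :: y2 :: y3 :: r) (Int.ofNat i)).getD 0)
        = perm.map (fun i => (PySem.List.pyGet? ([y0, y1, y2, y3] : List Int) (Int.ofNat i)).getD 0) := by
      apply List.map_congr_left
      intro i hi
      have h4 : i < 4 := htbl (perm, moves) (by simp) i hi
      rw [pyGet_small y0 y1 y2 y3 r i h4]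
    simp only [bscan, hsq]
    split
    · rfl
    · exact ih (fun p hp => htbl p (by simp [hp])) y0 y1 y2 y3 r g1 g2

theorem aloop_visited_non4 :
    ∀ (fuel : Nat) (v0 v : List (List Int)) (q : List (List Int × List String)) (g1 g2 : Int),
      (∀ sq ∈ v0, sq.length ≠ 4) → (∀ p ∈ q, p.1.length = 4) →
      aloop fuel (v0 ++ v) q g1 g2 = aloop fuel v q g1 g2 := by
  intro fuel
  induction fuel with
  | zero => intro _ _ _ _ _ _ _; rfl
  | succ n ih =>
    intro v0 v q g1 g2 hv0 hq
    cases q with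
    | nil => rfl
    | cons p rest =>
      obtain ⟨cur, moves⟩ := p
      have hlen : cur.length = 4 := hq (cur, moves) (by simp)
      have hmem : (cur ∈ v0 ++ v) ↔ cur ∈ v := by
        simp only [List.mem_append, or_iff_right_iff_imp]
        intro hc; exact absurd hlen (hv0 cur hc)
      simp only [aloop]
      by_cases hc : cur ∈ v
      · rw [if_pos (hmem.mpr hc), if_pos hc]
        exact ih v0 v rest g1 g2 hv0 (fun p hp => hq p (by simp [hp]))
      · rw [if_neg (fun h => hc (hmem.mp h)), if_neg hc]
        split
        · rfl
        · rw [List.append_assoc]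
          apply ih _ _ _ _ _ hv0
          intro p hp
          simp only [List.mem_append, List.mem_singleton] at hp
          rcases hp with ((((hp | hp) | hp) | hp) | hp)
          · exact hq p (by simp [hp])
          all_goals subst hp; rfl

theorem aloop_map (f : Int → Int) (S : List Int)
    (hf : ∀ x ∈ S, ∀ y ∈ S, f x = f y → x = y)
    (g1 g2 : Int) (hg1 : g1 ∈ S) (hg2 : g2 ∈ S) :
    ∀ (fuel : Nat) (v : List (List Int)) (q : List (List Int × List String)),
      (∀ sq ∈ v, sq.length = 4 ∧ ∀ x ∈ sq, x ∈ S) →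
      (∀ p ∈ q, p.1.length = 4 ∧ ∀ x ∈ p.1, x ∈ S) →
      aloop fuel (v.map (List.map f)) (q.map (fun p => (p.1.map f, p.2))) (f g1) (f g2)
        = Option.map (fun r => (r.1, r.2.map f)) (aloop fuel v q g1 g2) := by
  intro fuel
  induction fuel with
  | zero => intro v q _ _; rfl
  | succ n ih =>
    intro v q hv hq
    cases q with
    | nil => rfl
    | cons p rest =>
      obtain ⟨cur, moves⟩ := p
      obtain ⟨hlen, hScur⟩ := hq (cur, moves) (by simp)
      obtain ⟨x0, x1, x2, x3, rfl⟩ := list_len4 cur hlen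
      have hx0 : x0 ∈ S := hScur x0 (by simp)
      have hx1 : x1 ∈ S := hScur x1 (by simp)
      have hmem : (List.map f [x0, x1, x2, x3] ∈ v.map (List.map f)) ↔ [x0, x1, x2, x3] ∈ v := by
        constructor
        · intro h
          obtain ⟨sq, hsq, he⟩ := List.mem_map.mp h
          obtain ⟨_, hsqS⟩ := hv sq hsq
          rwa [map_inj_on f S hf sq _ hsqS hScur he] at hsq
        · intro h; exact List.mem_map_of_mem h
      simp only [List.map_cons, List.map_nil] at hmem
      simp only [List.map_cons, List.map_nil, aloop]
      by_cases hc : [x0, x1, x2, x3] ∈ v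
      · rw [if_pos (hmem.mpr hc), if_pos hc]
        exact ih v rest hv (fun p hp => hq p (by simp [hp]))
      · rw [if_neg (fun h => hc (hmem.mp h)), if_neg hc]
        have h0 : (f x0 = f g1) ↔ (x0 = g1) :=
          ⟨fun h => hf x0 hx0 g1 hg1 h, fun h => by rw [h]⟩
        have h1 : (f x1 = f g2) ↔ (x1 = g2) :=
          ⟨fun h => hf x1 hx1 g2 hg2 h, fun h => by rw [h]⟩
        have hcond : ((PySem.List.pyGet? (List.map f [x0, x1, x2, x3]) 0 == some (f g1)) &&
              (PySem.List.pyGet? (List.map f [x0, x1, x2, x3]) 1 == some (f g2)))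
            = ((PySem.List.pyGet? ([x0, x1, x2, x3] : List Int) 0 == some g1) &&
              (PySem.List.pyGet? ([x0, x1, x2, x3] : List Int) 1 == some g2)) := by
          have e0 : PySem.List.pyGet? (List.map f [x0, x1, x2, x3]) 0 = some (f x0) := rfl
          have e1 : PySem.List.pyGet? (List.map f [x0, x1, x2, x3]) 1 = some (f x1) := rfl
          have e0' : PySem.List.pyGet? ([x0, x1, x2, x3] : List Int) 0 = some x0 := rfl
          have e1' : PySem.List.pyGet? ([x0, x1, x2, x3] : List Int) 1 = some x1 := rfl
          rw [e0, e1, e0', e1']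
          have l0 : (f x0 == f g1) = (x0 == g1) := by
            by_cases hA : x0 = g1
            · simp [hA]
            · have hA' : ¬ f x0 = f g1 := fun h => hA (h0.mp h)
              simp [hA, hA']
          have l1 : (f x1 == f g2) = (x1 == g2) := by
            by_cases hB : x1 = g2
            · simp [hB]
            · have hB' : ¬ f x1 = f g2 := fun h => hB (h1.mp h)
              simp [hB, hB']
          have hsome : ∀ (a b : Int), ((some a == some b : Bool)) = (a == b) := fun a b => rfl
          rw [hsome, hsome, hsome, hsome, l0, l1]
        simp only [List.map_cons, List.map_nil] at hcond
        rw [hcond]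
        by_cases hgoal : ((PySem.List.pyGet? ([x0, x1, x2, x3] : List Int) 0 == some g1) &&
            (PySem.List.pyGet? ([x0, x1, x2, x3] : List Int) 1 == some g2)) = true
        · rw [if_pos hgoal, if_pos hgoal]; rfl
        · rw [if_neg hgoal, if_neg hgoal]
          have rcw : rot_cw (List.map f [x0, x1, x2, x3]) = List.map f (rot_cw [x0, x1, x2, x3]) := rfl
          have rccw : rot_ccw (List.map f [x0, x1, x2, x3]) = List.map f (rot_ccw [x0, x1, x2, x3]) := rfl
          have r180 : rot_180 (List.map f [x0, x1, x2, x3]) = List.map f (rot_180 [x0, x1, x2, x3]) := rfl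
          have rbr : rot_br (List.map f [x0, x1, x2, x3]) = List.map f (rot_br [x0, x1, x2, x3]) := rfl
          have hv' : ∀ sq ∈ v ++ [[x0, x1, x2, x3]], sq.length = 4 ∧ ∀ x ∈ sq, x ∈ S := by
            intro sq hsq
            rcases List.mem_append.mp hsq with h | h
            · exact hv sq h
            · simp only [List.mem_singleton] at h; subst h; exact ⟨hlen, hScur⟩
          have hq' : ∀ p ∈ (((rest ++ [(rot_cw [x0, x1, x2, x3], moves ++ ["cw"])])
                  ++ [(rot_ccw [x0, x1, x2, x3], moves ++ ["ccw"])])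
                  ++ [(rot_180 [x0, x1, x2, x3], moves ++ ["180"])])
                  ++ [(rot_br [x0, x1, x2, x3], moves ++ ["br"])],
              p.1.length = 4 ∧ ∀ x ∈ p.1, x ∈ S := by
            intro p hp
            simp only [List.mem_append, List.mem_singleton] at hp
            rcases hp with ((((hp | hp) | hp) | hp) | hp)
            · exact hq p (by simp [hp])
            all_goals subst hp
            all_goals refine ⟨rfl, ?_⟩
            all_goals intro x hx
            · rw [show rot_cw [x0, x1, x2, x3] = [x2, x0, x3, x1] from rfl] at hx
              rcases List.mem_cons.mp hx with h | hx
              · subst h; exact hScur _ (by simp)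
              rcases List.mem_cons.mp hx with h | hx
              · subst h; exact hScur _ (by simp)
              rcases List.mem_cons.mp hx with h | hx
              · subst h; exact hScur _ (by simp)
              rcases List.mem_cons.mp hx with h | hx
              · subst h; exact hScur _ (by simp)
              · simp at hx
            · rw [show rot_ccw [x0, x1, x2, x3] = [x1, x3, x0, x2] from rfl] at hx
              rcases List.mem_cons.mp hx with h | hx
              · subst h; exact hScur _ (by simp)
              rcases List.mem_cons.mp hx with h | hx
              · subst h; exact hScur _ (by simp)
              rcases List.mem_cons.mp hx with h | hx
              · subst h; exact hScur _ (by simp)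
              rcases List.mem_cons.mp hx with h | hx
              · subst h; exact hScur _ (by simp)
              · simp at hx
            · rw [show rot_180 [x0, x1, x2, x3] = [x3, x2, x1, x0] from rfl] at hx
              rcases List.mem_cons.mp hx with h | hx
              · subst h; exact hScur _ (by simp)
              rcases List.mem_cons.mp hx with h | hx
              · subst h; exact hScur _ (by simp)
              rcases List.mem_cons.mp hx with h | hx
              · subst h; exact hScur _ (by simp)
              rcases List.mem_cons.mp hx with h | hx
              · subst h; exact hScur _ (by simp)
              · simp at hx
            · rw [show rot_br [x0, x1, x2, x3] = [x1, x0, x2, x3] from rfl] at hx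
              rcases List.mem_cons.mp hx with h | hx
              · subst h; exact hScur _ (by simp)
              rcases List.mem_cons.mp hx with h | hx
              · subst h; exact hScur _ (by simp)
              rcases List.mem_cons.mp hx with h | hx
              · subst h; exact hScur _ (by simp)
              rcases List.mem_cons.mp hx with h | hx
              · subst h; exact hScur _ (by simp)
              · simp at hx
          have H := ih (v ++ [[x0, x1, x2, x3]])
            ((((rest ++ [(rot_cw [x0, x1, x2, x3], moves ++ ["cw"])])
                  ++ [(rot_ccw [x0, x1, x2, x3], moves ++ ["ccw"])])
                  ++ [(rot_180 [x0, x1, x2, x3], moves ++ ["180"])])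
                  ++ [(rot_br [x0, x1, x2, x3], moves ++ ["br"])]) hv' hq'
          simp only [List.map_cons, List.map_nil] at rcw rccw r180 rbr
          simp only [List.map_append, List.map_cons, List.map_nil] at H
          rw [rcw, rccw, r180, rbr]
          exact H

theorem bscan_map (f : Int → Int) (S : List Int)
    (hf : ∀ x ∈ S, ∀ y ∈ S, f x = f y → x = y)
    (g1 g2 : Int) (hg1 : g1 ∈ S) (hg2 : g2 ∈ S) :
    ∀ (tbl : List (List Nat × List String)),
      (∀ p ∈ tbl, p.1.length = 4 ∧ ∀ i ∈ p.1, i < 4) →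
      ∀ (y0 y1 y2 y3 : Int), y0 ∈ S → y1 ∈ S → y2 ∈ S → y3 ∈ S →
      bscan tbl (([y0, y1, y2, y3] : List Int).map f) (f g1) (f g2)
        = Option.map (fun r => (r.1, r.2.map f)) (bscan tbl [y0, y1, y2, y3] g1 g2) := by
  intro tbl
  induction tbl with
  | nil => intro _ _ _ _ _ _ _ _ _; rfl
  | cons p rest ih =>
    intro htbl y0 y1 y2 y3 hy0 hy1 hy2 hy3
    obtain ⟨perm, moves⟩ := p
    obtain ⟨hlen, hlt⟩ := htbl (perm, moves) (by simp)
    obtain ⟨i0, i1, i2, i3, rfl⟩ := list_len4 perm hlen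
    have h0 : i0 < 4 := hlt i0 (by simp)
    have h1 : i1 < 4 := hlt i1 (by simp)
    have h2 : i2 < 4 := hlt i2 (by simp)
    have h3 : i3 < 4 := hlt i3 (by simp)
    have elMap : ∀ i, i < 4 →
        (PySem.List.pyGet? ([f y0, f y1, f y2, f y3] : List Int) (Int.ofNat i)).getD 0
          = f ((PySem.List.pyGet? ([y0, y1, y2, y3] : List Int) (Int.ofNat i)).getD 0) := by
      intro i hi; interval_cases i <;> rfl
    have elS : ∀ i, i < 4 → ((PySem.List.pyGet? ([y0, y1, y2, y3] : List Int) (Int.ofNat i)).getD 0) ∈ S := by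
      intro i hi; interval_cases i
      exacts [hy0, hy1, hy2, hy3]
    simp only [bscan, List.map_cons, List.map_nil]
    rw [elMap i0 h0, elMap i1 h1, elMap i2 h2, elMap i3 h3]
    have e0 : PySem.List.pyGet?
        ([f ((PySem.List.pyGet? ([y0, y1, y2, y3] : List Int) (Int.ofNat i0)).getD 0),
          f ((PySem.List.pyGet? ([y0, y1, y2, y3] : List Int) (Int.ofNat i1)).getD 0),
          f ((PySem.List.pyGet? ([y0, y1, y2, y3] : List Int) (Int.ofNat i2)).getD 0),
          f ((PySem.List.pyGet? ([y0, y1, y2, y3] : List Int) (Int.ofNat i3)).getD 0)] : List Int) 0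
        = some (f ((PySem.List.pyGet? ([y0, y1, y2, y3] : List Int) (Int.ofNat i0)).getD 0)) := rfl
    have e1 : PySem.List.pyGet?
        ([f ((PySem.List.pyGet? ([y0, y1, y2, y3] : List Int) (Int.ofNat i0)).getD 0),
          f ((PySem.List.pyGet? ([y0, y1, y2, y3] : List Int) (Int.ofNat i1)).getD 0),
          f ((PySem.List.pyGet? ([y0, y1, y2, y3] : List Int) (Int.ofNat i2)).getD 0),
          f ((PySem.List.pyGet? ([y0, y1, y2, y3] : List Int) (Int.ofNat i3)).getD 0)] : List Int) 1
        = some (f ((PySem.List.pyGet? ([y0, y1, y2, y3] : List Int) (Int.ofNat i1)).getD 0)) := rfl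
    rw [e0, e1]
    set a0 := (PySem.List.pyGet? ([y0, y1, y2, y3] : List Int) (Int.ofNat i0)).getD 0 with ha0
    set a1 := (PySem.List.pyGet? ([y0, y1, y2, y3] : List Int) (Int.ofNat i1)).getD 0 with ha1
    set a2 := (PySem.List.pyGet? ([y0, y1, y2, y3] : List Int) (Int.ofNat i2)).getD 0 with ha2
    set a3 := (PySem.List.pyGet? ([y0, y1, y2, y3] : List Int) (Int.ofNat i3)).getD 0 with ha3
    have e0' : PySem.List.pyGet? ([a0, a1, a2, a3] : List Int) 0 = some a0 := rfl
    have e1' : PySem.List.pyGet? ([a0, a1, a2, a3] : List Int) 1 = some a1 := rfl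
    have hsome : ∀ (a b : Int), ((some a == some b : Bool)) = (a == b) := fun a b => rfl
    have l0 : (f a0 == f g1) = (a0 == g1) := by
      by_cases hA : a0 = g1
      · simp [hA]
      · have hA' : ¬ f a0 = f g1 := fun h => hA (hf a0 (elS i0 h0) g1 hg1 h)
        simp [hA, hA']
    have l1 : (f a1 == f g2) = (a1 == g2) := by
      by_cases hB : a1 = g2
      · simp [hB]
      · have hB' : ¬ f a1 = f g2 := fun h => hB (hf a1 (elS i1 h1) g2 hg2 h)
        simp [hB, hB']
    rw [e0', e1', hsome, hsome, hsome, hsome, l0, l1]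
    split
    · rfl
    · exact ih (fun p hp => htbl p (by simp [hp])) y0 y1 y2 y3 hy0 hy1 hy2 hy3

theorem beq_some (a b : Int) : ((some a == some b : Bool)) = (a == b) := rfl

theorem getD_idxOf (l : List Int) (v : Int) (h : v ∈ l) : l.getD (l.idxOf v) 0 = v := by
  rw [List.getD_eq_getElem?_getD, List.getElem?_eq_getElem (List.idxOf_lt_length_of_mem h)]
  simp [List.getElem_idxOf]

theorem idxOf_le (l : List Int) : ∀ i, (h : i < l.length) → l.idxOf l[i] ≤ i := by
  induction l with
  | nil => intro i h; simp at h
  | cons x xs ih =>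
    intro i h
    cases i with
    | zero => simp
    | succ n =>
      have hn : n < xs.length := by simpa using Nat.lt_of_succ_lt_succ h
      simp only [List.getElem_cons_succ, List.idxOf_cons]
      by_cases hx : x = xs[n]'hn
      · simp [hx]
      · have hb : (x == xs[n]'hn) = false := by simp [hx]
        simp only [hb, cond_false]
        have := ih n hn
        omega

theorem pvCheck_canon (a b c d e f : Nat) (ha : a < 1) (hb : b < 2) (hc : c < 3)
    (hd : d < 4) (he : e < 5) (hf : f < 6) : pvCheck a b c d e f = true := by
  have h := pvCheck_all
  simp only [List.all_eq_true, List.mem_range] at h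
  exact h a ha b hb c hc d hd e he f hf

-- data of the canonicalisation: value list, renaming map, canonical value set
def pvVals (s0 s1 s2 s3 g1 g2 : Int) : List Int := [s0, s1, s2, s3, g1, g2]
def pvF (s0 s1 s2 s3 g1 g2 : Int) : Int → Int :=
  fun x => (pvVals s0 s1 s2 s3 g1 g2).getD x.toNat 0
def pvS (s0 s1 s2 s3 g1 g2 : Int) : List Int :=
  (pvVals s0 s1 s2 s3 g1 g2).map (fun v => (((pvVals s0 s1 s2 s3 g1 g2).idxOf v : Nat) : Int))

theorem pvF_idx (s0 s1 s2 s3 g1 g2 : Int) (u : Int) (hu : u ∈ pvVals s0 s1 s2 s3 g1 g2) :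
    pvF s0 s1 s2 s3 g1 g2 (((pvVals s0 s1 s2 s3 g1 g2).idxOf u : Nat) : Int) = u := by
  unfold pvF
  rw [Int.toNat_natCast]
  exact getD_idxOf _ u hu

theorem pvS_inj (s0 s1 s2 s3 g1 g2 : Int) :
    ∀ x ∈ pvS s0 s1 s2 s3 g1 g2, ∀ y ∈ pvS s0 s1 s2 s3 g1 g2,
      pvF s0 s1 s2 s3 g1 g2 x = pvF s0 s1 s2 s3 g1 g2 y → x = y := by
  intro x hx y hy h
  obtain ⟨u, hu, rfl⟩ := List.mem_map.mp hx
  obtain ⟨w, hw, rfl⟩ := List.mem_map.mp hy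
  rw [pvF_idx s0 s1 s2 s3 g1 g2 u hu, pvF_idx s0 s1 s2 s3 g1 g2 w hw] at h
  rw [h]

-- canonical-transfer core over abstract canonical components (plain variables keep
-- definitional reduction cheap)
theorem transfer_core (s0 s1 s2 s3 g1 g2 : Int) (f : Int → Int) (S : List Int)
    (hf : ∀ x ∈ S, ∀ y ∈ S, f x = f y → x = y)
    (c0 c1 c2 c3 c4 c5 : Int)
    (hS0 : c0 ∈ S) (hS1 : c1 ∈ S) (hS2 : c2 ∈ S) (hS3 : c3 ∈ S) (hS4 : c4 ∈ S) (hS5 : c5 ∈ S)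
    (F0 : f c0 = s0) (F1 : f c1 = s1) (F2 : f c2 = s2) (F3 : f c3 = s3)
    (F4 : f c4 = g1) (F5 : f c5 = g2)
    (h1 : aloop 1000 [] [([c0, c1, c2, c3], [])] c4 c5 = bscan bTable [c0, c1, c2, c3] c4 c5)
    (h2c : ((c0 == c4) && (c1 == c5)) = false →
      aloop 999 [] [(rot_cw [c0, c1, c2, c3], ["cw"]), (rot_ccw [c0, c1, c2, c3], ["ccw"]),
        (rot_180 [c0, c1, c2, c3], ["180"]), (rot_br [c0, c1, c2, c3], ["br"])] c4 c5
        = bscan (bTable.drop 1) [c0, c1, c2, c3] c4 c5) :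
    (aloop 1000 [] [([s0, s1, s2, s3], [])] g1 g2 = bscan bTable [s0, s1, s2, s3] g1 g2)
    ∧ (¬(s0 = g1 ∧ s1 = g2) →
       aloop 999 [] [(rot_cw [s0, s1, s2, s3], ["cw"]), (rot_ccw [s0, s1, s2, s3], ["ccw"]),
                     (rot_180 [s0, s1, s2, s3], ["180"]), (rot_br [s0, s1, s2, s3], ["br"])] g1 g2
         = bscan (bTable.drop 1) [s0, s1, s2, s3] g1 g2) := by
  have htbl : ∀ p ∈ bTable, p.1.length = 4 ∧ ∀ i ∈ p.1, i < 4 := by decide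
  have htbl' : ∀ p ∈ bTable.drop 1, p.1.length = 4 ∧ ∀ i ∈ p.1, i < 4 := by decide
  have hqS : ∀ x ∈ ([c0, c1, c2, c3] : List Int), x ∈ S := by
    intro x hx
    rcases List.mem_cons.mp hx with h | hx
    · subst h; exact hS0
    rcases List.mem_cons.mp hx with h | hx
    · subst h; exact hS1
    rcases List.mem_cons.mp hx with h | hx
    · subst h; exact hS2
    rcases List.mem_cons.mp hx with h | hx
    · subst h; exact hS3
    · simp at hx
  constructor
  · -- part 1: the full search from a 4-cell start
    have eA := aloop_map f S hf c4 c5 hS4 hS5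
      1000 [] [([c0, c1, c2, c3], [])] (by intro sq h; simp at h)
      (by intro p hp
          simp only [List.mem_singleton] at hp
          subst hp
          exact ⟨rfl, hqS⟩)
    have eB := bscan_map f S hf c4 c5 hS4 hS5 bTable htbl c0 c1 c2 c3 hS0 hS1 hS2 hS3
    simp only [List.map_cons, List.map_nil, F0, F1, F2, F3, F4, F5] at eA eB
    rw [eA, eB, h1]
  · -- part 2: from after the first expansion (length > 4 start, no immediate goal)
    intro himm
    have hcondC : ((c0 == c4) && (c1 == c5)) = false := by
      by_cases h1' : c0 = c4
      · have h2' : ¬ c1 = c5 := by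
          intro h2'
          exact himm ⟨F0.symm.trans (by rw [h1']; exact F4), F1.symm.trans (by rw [h2']; exact F5)⟩
        simp [h1', h2']
      · simp [h1']
    have h2 := h2c hcondC
    have hq2 : ∀ p ∈ [(rot_cw [c0, c1, c2, c3], (["cw"] : List String)), (rot_ccw [c0, c1, c2, c3], ["ccw"]),
        (rot_180 [c0, c1, c2, c3], ["180"]), (rot_br [c0, c1, c2, c3], ["br"])],
        p.1.length = 4 ∧ ∀ x ∈ p.1, x ∈ S := by
      intro p hp
      simp only [List.mem_cons, List.not_mem_nil, or_false] at hp
      rcases hp with hp | hp | hp | hp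
      · subst hp
        refine ⟨rfl, ?_⟩
        rw [show rot_cw [c0, c1, c2, c3] = [c2, c0, c3, c1] from rfl]
        intro x hx
        apply hqS; simp only [List.mem_cons, List.not_mem_nil, or_false] at hx ⊢; tauto
      · subst hp
        refine ⟨rfl, ?_⟩
        rw [show rot_ccw [c0, c1, c2, c3] = [c1, c3, c0, c2] from rfl]
        intro x hx
        apply hqS; simp only [List.mem_cons, List.not_mem_nil, or_false] at hx ⊢; tauto
      · subst hp
        refine ⟨rfl, ?_⟩
        rw [show rot_180 [c0, c1, c2, c3] = [c3, c2, c1, c0] from rfl]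
        intro x hx
        apply hqS; simp only [List.mem_cons, List.not_mem_nil, or_false] at hx ⊢; tauto
      · subst hp
        refine ⟨rfl, ?_⟩
        rw [show rot_br [c0, c1, c2, c3] = [c1, c0, c2, c3] from rfl]
        intro x hx
        apply hqS; simp only [List.mem_cons, List.not_mem_nil, or_false] at hx ⊢; tauto
    have eA := aloop_map f S hf c4 c5 hS4 hS5
      999 [] [(rot_cw [c0, c1, c2, c3], ["cw"]), (rot_ccw [c0, c1, c2, c3], ["ccw"]),
        (rot_180 [c0, c1, c2, c3], ["180"]), (rot_br [c0, c1, c2, c3], ["br"])]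
      (by intro sq h; simp at h) hq2
    have eB := bscan_map f S hf c4 c5 hS4 hS5 (bTable.drop 1) htbl' c0 c1 c2 c3 hS0 hS1 hS2 hS3
    rw [show rot_cw [c0, c1, c2, c3] = [c2, c0, c3, c1] from rfl,
        show rot_ccw [c0, c1, c2, c3] = [c1, c3, c0, c2] from rfl,
        show rot_180 [c0, c1, c2, c3] = [c3, c2, c1, c0] from rfl,
        show rot_br [c0, c1, c2, c3] = [c1, c0, c2, c3] from rfl] at eA h2
    simp only [List.map_cons, List.map_nil, F0, F1, F2, F3, F4, F5] at eA eB
    rw [show rot_cw [s0, s1, s2, s3] = [s2, s0, s3, s1] from rfl,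
        show rot_ccw [s0, s1, s2, s3] = [s1, s3, s0, s2] from rfl,
        show rot_180 [s0, s1, s2, s3] = [s3, s2, s1, s0] from rfl,
        show rot_br [s0, s1, s2, s3] = [s1, s0, s2, s3] from rfl]
    rw [eA, eB, h2]

-- the canonical-transfer facts for arbitrary integers
theorem transfer (s0 s1 s2 s3 g1 g2 : Int) :
    (aloop 1000 [] [([s0, s1, s2, s3], [])] g1 g2 = bscan bTable [s0, s1, s2, s3] g1 g2)
    ∧ (¬(s0 = g1 ∧ s1 = g2) →
       aloop 999 [] [(rot_cw [s0, s1, s2, s3], ["cw"]), (rot_ccw [s0, s1, s2, s3], ["ccw"]),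
                     (rot_180 [s0, s1, s2, s3], ["180"]), (rot_br [s0, s1, s2, s3], ["br"])] g1 g2
         = bscan (bTable.drop 1) [s0, s1, s2, s3] g1 g2) := by
  have hm0 : s0 ∈ pvVals s0 s1 s2 s3 g1 g2 := by simp [pvVals]
  have hm1 : s1 ∈ pvVals s0 s1 s2 s3 g1 g2 := by simp [pvVals]
  have hm2 : s2 ∈ pvVals s0 s1 s2 s3 g1 g2 := by simp [pvVals]
  have hm3 : s3 ∈ pvVals s0 s1 s2 s3 g1 g2 := by simp [pvVals]
  have hm4 : g1 ∈ pvVals s0 s1 s2 s3 g1 g2 := by simp [pvVals]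
  have hm5 : g2 ∈ pvVals s0 s1 s2 s3 g1 g2 := by simp [pvVals]
  have B0 : (pvVals s0 s1 s2 s3 g1 g2).idxOf s0 < 1 := by
    have h := idxOf_le (pvVals s0 s1 s2 s3 g1 g2) 0 (by simp [pvVals])
    simp only [pvVals] at h ⊢; simpa using Nat.lt_succ_of_le h
  have B1 : (pvVals s0 s1 s2 s3 g1 g2).idxOf s1 < 2 := by
    have h := idxOf_le (pvVals s0 s1 s2 s3 g1 g2) 1 (by simp [pvVals])
    simp only [pvVals] at h ⊢; simpa using Nat.lt_succ_of_le h
  have B2 : (pvVals s0 s1 s2 s3 g1 g2).idxOf s2 < 3 := by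
    have h := idxOf_le (pvVals s0 s1 s2 s3 g1 g2) 2 (by simp [pvVals])
    simp only [pvVals] at h ⊢; simpa using Nat.lt_succ_of_le h
  have B3 : (pvVals s0 s1 s2 s3 g1 g2).idxOf s3 < 4 := by
    have h := idxOf_le (pvVals s0 s1 s2 s3 g1 g2) 3 (by simp [pvVals])
    simp only [pvVals] at h ⊢; simpa using Nat.lt_succ_of_le h
  have B4 : (pvVals s0 s1 s2 s3 g1 g2).idxOf g1 < 5 := by
    have h := idxOf_le (pvVals s0 s1 s2 s3 g1 g2) 4 (by simp [pvVals])
    simp only [pvVals] at h ⊢; simpa using Nat.lt_succ_of_le h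
  have B5 : (pvVals s0 s1 s2 s3 g1 g2).idxOf g2 < 6 := by
    have h := idxOf_le (pvVals s0 s1 s2 s3 g1 g2) 5 (by simp [pvVals])
    simp only [pvVals] at h ⊢; simpa using Nat.lt_succ_of_le h
  have hcanon := pvCheck_canon _ _ _ _ _ _ B0 B1 B2 B3 B4 B5
  unfold pvCheck at hcanon
  rw [Bool.and_eq_true] at hcanon
  exact transfer_core s0 s1 s2 s3 g1 g2 (pvF s0 s1 s2 s3 g1 g2) (pvS s0 s1 s2 s3 g1 g2)
    (pvS_inj s0 s1 s2 s3 g1 g2) _ _ _ _ _ _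
    (List.mem_map_of_mem hm0) (List.mem_map_of_mem hm1) (List.mem_map_of_mem hm2)
    (List.mem_map_of_mem hm3) (List.mem_map_of_mem hm4) (List.mem_map_of_mem hm5)
    (pvF_idx s0 s1 s2 s3 g1 g2 s0 hm0) (pvF_idx s0 s1 s2 s3 g1 g2 s1 hm1)
    (pvF_idx s0 s1 s2 s3 g1 g2 s2 hm2) (pvF_idx s0 s1 s2 s3 g1 g2 s3 hm3)
    (pvF_idx s0 s1 s2 s3 g1 g2 g1 hm4) (pvF_idx s0 s1 s2 s3 g1 g2 g2 hm5)
    (eq_of_beq hcanon.1)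
    (fun hc => by
      have h := hcanon.2
      rw [if_neg (by simp [hc])] at h
      exact eq_of_beq h)

-- one-step unfolding equations (definitional)
theorem aloop_cons (fuel : Nat) (v : List (List Int)) (cur : List Int) (m : List String)
    (rest : List (List Int × List String)) (g1 g2 : Int) :
    aloop (fuel + 1) v ((cur, m) :: rest) g1 g2 =
      if cur ∈ v then aloop fuel v rest g1 g2
      else if (PySem.List.pyGet? cur 0 == some g1) && (PySem.List.pyGet? cur 1 == some g2) then
        some (m, cur)
      else aloop fuel (v ++ [cur])
        ((((rest ++ [(rot_cw cur, m ++ ["cw"])]) ++ [(rot_ccw cur, m ++ ["ccw"])])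
          ++ [(rot_180 cur, m ++ ["180"])]) ++ [(rot_br cur, m ++ ["br"])]) g1 g2 := rfl

theorem bscan_cons (perm : List Nat) (moves : List String) (rest : List (List Nat × List String))
    (start : List Int) (g1 g2 : Int) :
    bscan ((perm, moves) :: rest) start g1 g2 =
      if (PySem.List.pyGet? (perm.map (fun i => (PySem.List.pyGet? start (Int.ofNat i)).getD 0)) 0 == some g1)
          && (PySem.List.pyGet? (perm.map (fun i => (PySem.List.pyGet? start (Int.ofNat i)).getD 0)) 1 == some g2) then
        some (moves, perm.map (fun i => (PySem.List.pyGet? start (Int.ofNat i)).getD 0))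
      else bscan rest start g1 g2 := rfl

theorem agree_len4 (s0 s1 s2 s3 g1 g2 : Int) :
    find_rotation_sequence [s0, s1, s2, s3] g1 g2 = find_rotation_sequence_alt [s0, s1, s2, s3] g1 g2 :=
  (transfer s0 s1 s2 s3 g1 g2).1

theorem agree_long (s0 s1 s2 s3 : Int) (r : List Int) (hr : r ≠ []) (g1 g2 : Int)
    (himm : ¬(s0 = g1 ∧ s1 = g2)) :
    find_rotation_sequence (s0 :: s1 :: s2 :: s3 :: r) g1 g2
      = find_rotation_sequence_alt (s0 :: s1 :: s2 :: s3 :: r) g1 g2 := by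
  have e0 : PySem.List.pyGet? (s0 :: s1 :: s2 :: s3 :: r) 0 = some s0 :=
    PySem.List.pyGet?_zero_cons _ _
  have e1 : PySem.List.pyGet? (s0 :: s1 :: s2 :: s3 :: r) 1 = some s1 := by
    simpa using PySem.List.pyGet?_ofNat (s0 :: s1 :: s2 :: s3 :: r) 1 (by simp)
  have e2 : PySem.List.pyGet? (s0 :: s1 :: s2 :: s3 :: r) 2 = some s2 := by
    simpa using PySem.List.pyGet?_ofNat (s0 :: s1 :: s2 :: s3 :: r) 2 (by simp)
  have e3 : PySem.List.pyGet? (s0 :: s1 :: s2 :: s3 :: r) 3 = some s3 := by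
    simpa using PySem.List.pyGet?_ofNat (s0 :: s1 :: s2 :: s3 :: r) 3 (by simp)
  have hcondv : (((s0 == g1) : Bool) && (s1 == g2)) = false := by
    by_cases h1 : s0 = g1
    · have h2 : ¬ s1 = g2 := fun h => himm ⟨h1, h⟩
      simp [h1, h2]
    · simp [h1]
  have hcond : ((PySem.List.pyGet? (s0 :: s1 :: s2 :: s3 :: r) 0 == some g1)
      && (PySem.List.pyGet? (s0 :: s1 :: s2 :: s3 :: r) 1 == some g2)) = false := by
    rw [e0, e1, beq_some, beq_some, hcondv]
  have rc : rot_cw (s0 :: s1 :: s2 :: s3 :: r) = [s2, s0, s3, s1] := by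
    simp only [rot_cw]; rw [e0, e1, e2, e3]; rfl
  have rcc : rot_ccw (s0 :: s1 :: s2 :: s3 :: r) = [s1, s3, s0, s2] := by
    simp only [rot_ccw]; rw [e0, e1, e2, e3]; rfl
  have r18 : rot_180 (s0 :: s1 :: s2 :: s3 :: r) = [s3, s2, s1, s0] := by
    simp only [rot_180]; rw [e0, e1, e2, e3]; rfl
  have rb : rot_br (s0 :: s1 :: s2 :: s3 :: r) = [s1, s0, s2, s3] := by
    simp only [rot_br]; rw [e0, e1, e2, e3]; rfl
  have hlen : (s0 :: s1 :: s2 :: s3 :: r).length ≠ 4 := by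
    have := List.length_pos_of_ne_nil hr
    simp only [List.length_cons]
    omega
  have htbl'' : ∀ p ∈ bTable.drop 1, ∀ i ∈ p.1, i < 4 := by decide
  -- evaluate B first
  have hB : find_rotation_sequence_alt (s0 :: s1 :: s2 :: s3 :: r) g1 g2
      = bscan (bTable.drop 1) [s0, s1, s2, s3] g1 g2 := by
    show bscan bTable (s0 :: s1 :: s2 :: s3 :: r) g1 g2 = _
    rw [show bTable = ([0, 1, 2, 3], ([] : List String)) :: bTable.drop 1 from rfl, bscan_cons]
    have hsq : [0, 1, 2, 3].map
        (fun i => (PySem.List.pyGet? (s0 :: s1 :: s2 :: s3 :: r) (Int.ofNat i)).getD 0)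
        = [s0, s1, s2, s3] := by
      simp only [List.map_cons, List.map_nil]
      rw [show Int.ofNat 0 = (0 : Int) from rfl, show Int.ofNat 1 = (1 : Int) from rfl,
          show Int.ofNat 2 = (2 : Int) from rfl, show Int.ofNat 3 = (3 : Int) from rfl]
      rw [e0, e1, e2, e3]
      rfl
    rw [hsq]
    rw [show PySem.List.pyGet? ([s0, s1, s2, s3] : List Int) 0 = some s0 from rfl,
        show PySem.List.pyGet? ([s0, s1, s2, s3] : List Int) 1 = some s1 from rfl,
        beq_some, beq_some, hcondv]
    rw [if_neg (by simp)]
    exact bscan_tail_irrel (bTable.drop 1) htbl'' s0 s1 s2 s3 r g1 g2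
  -- evaluate A's first step
  show aloop (999 + 1) [] [((s0 :: s1 :: s2 :: s3 :: r), [])] g1 g2 = _
  rw [aloop_cons, if_neg (by simp), hcond]
  rw [if_neg (by simp)]
  simp only [List.nil_append]
  rw [rc, rcc, r18, rb]
  simp only [List.cons_append, List.nil_append]
  rw [show [(s0 :: s1 :: s2 :: s3 :: r)] = [(s0 :: s1 :: s2 :: s3 :: r)] ++ ([] : List (List Int)) from by simp]
  rw [aloop_visited_non4 999 [(s0 :: s1 :: s2 :: s3 :: r)] []
      [([s2, s0, s3, s1], ["cw"]), ([s1, s3, s0, s2], ["ccw"]), ([s3, s2, s1, s0], ["180"]), ([s1, s0, s2, s3], ["br"])]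
      g1 g2
      (by intro sq hsq; simp only [List.mem_singleton] at hsq; subst hsq; exact hlen)
      (by intro p hp
          simp only [List.mem_cons, List.not_mem_nil, or_false] at hp
          rcases hp with hp | hp | hp | hp <;> (subst hp; rfl))]
  have ht2 := (transfer s0 s1 s2 s3 g1 g2).2 himm
  rw [show rot_cw [s0, s1, s2, s3] = [s2, s0, s3, s1] from rfl,
      show rot_ccw [s0, s1, s2, s3] = [s1, s3, s0, s2] from rfl,
      show rot_180 [s0, s1, s2, s3] = [s3, s2, s1, s0] from rfl,
      show rot_br [s0, s1, s2, s3] = [s1, s0, s2, s3] from rfl] at ht2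
  rw [ht2, hB]


-- ===== VERDICT (by name: the statements are the Claim_ definitions above) =====
theorem find_rotation_sequence_spec : Claim_unchanged_find_rotation_sequence := by
  intro start g1 g2 hdom hpre
  unfold Spec_find_rotation_sequence
  intro hnd
  unfold Pre_find_rotation_sequence at hpre
  rcases start with _ | ⟨s0, start⟩
  · simp at hpre
  rcases start with _ | ⟨s1, start⟩
  · simp at hpre
  rcases start with _ | ⟨s2, start⟩
  · simp at hpre
  rcases start with _ | ⟨s3, r⟩
  · simp at hpre
  cases r with
  | nil => exact agree_len4 s0 s1 s2 s3 g1 g2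
  | cons a rest =>
    apply agree_long s0 s1 s2 s3 (a :: rest) (by simp) g1 g2
    rintro ⟨h1, h2⟩
    apply hnd
    unfold D_find_rotation_sequence
    refine ⟨by simp only [List.length_cons]; omega, ?_, ?_⟩
    · rw [PySem.List.pyGet?_zero_cons, h1]
    · have e1 : PySem.List.pyGet? (s0 :: s1 :: s2 :: s3 :: a :: rest) 1 = some s1 := by
        simpa using PySem.List.pyGet?_ofNat (s0 :: s1 :: s2 :: s3 :: a :: rest) 1 (by simp)
      rw [e1, h2]

theorem find_rotation_sequence_changed : Claim_changed_find_rotation_sequence := by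
  unfold Claim_changed_find_rotation_sequence; decide

theorem find_rotation_sequence_tight : Claim_exact_find_rotation_sequence := by
  intro start g1 g2 hdom hpre hD
  unfold D_find_rotation_sequence at hD
  obtain ⟨hlen, hA, hB⟩ := hD
  unfold Pre_find_rotation_sequence at hpre
  rcases start with _ | ⟨s0, start⟩
  · simp at hpre
  rcases start with _ | ⟨s1, start⟩
  · simp at hpre
  rcases start with _ | ⟨s2, start⟩
  · simp at hpre
  rcases start with _ | ⟨s3, r⟩
  · simp at hpre
  cases r with
  | nil => simp at hlen
  | cons a rest =>
    rw [PySem.List.pyGet?_zero_cons] at hA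
    have e1 : PySem.List.pyGet? (s0 :: s1 :: s2 :: s3 :: a :: rest) 1 = some s1 := by
      simpa using PySem.List.pyGet?_ofNat (s0 :: s1 :: s2 :: s3 :: a :: rest) 1 (by simp)
    rw [e1] at hB
    have hs0 : s0 = g1 := by injection hA
    have hs1 : s1 = g2 := by injection hB
    have hAval : find_rotation_sequence (s0 :: s1 :: s2 :: s3 :: a :: rest) g1 g2
        = some ([], s0 :: s1 :: s2 :: s3 :: a :: rest) := by
      show aloop (999 + 1) [] [((s0 :: s1 :: s2 :: s3 :: a :: rest), [])] g1 g2 = _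
      rw [aloop_cons, if_neg (by simp)]
      rw [show PySem.List.pyGet? (s0 :: s1 :: s2 :: s3 :: a :: rest) 0 = some s0 from
            PySem.List.pyGet?_zero_cons _ _, e1]
      rw [beq_some, beq_some]
      simp [hs0, hs1]
    have hBval : find_rotation_sequence_alt (s0 :: s1 :: s2 :: s3 :: a :: rest) g1 g2
        = some ([], [s0, s1, s2, s3]) := by
      show bscan bTable (s0 :: s1 :: s2 :: s3 :: a :: rest) g1 g2 = _
      rw [show bTable = ([0, 1, 2, 3], ([] : List String)) :: bTable.drop 1 from rfl, bscan_cons]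
      have hsq : [0, 1, 2, 3].map
          (fun i => (PySem.List.pyGet? (s0 :: s1 :: s2 :: s3 :: a :: rest) (Int.ofNat i)).getD 0)
          = [s0, s1, s2, s3] := by
        simp only [List.map_cons, List.map_nil]
        rw [show Int.ofNat 0 = (0 : Int) from rfl, show Int.ofNat 1 = (1 : Int) from rfl,
            show Int.ofNat 2 = (2 : Int) from rfl, show Int.ofNat 3 = (3 : Int) from rfl]
        rw [show PySem.List.pyGet? (s0 :: s1 :: s2 :: s3 :: a :: rest) 0 = some s0 from
              PySem.List.pyGet?_zero_cons _ _, e1]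
        have e2 : PySem.List.pyGet? (s0 :: s1 :: s2 :: s3 :: a :: rest) 2 = some s2 := by
          simpa using PySem.List.pyGet?_ofNat (s0 :: s1 :: s2 :: s3 :: a :: rest) 2 (by simp)
        have e3 : PySem.List.pyGet? (s0 :: s1 :: s2 :: s3 :: a :: rest) 3 = some s3 := by
          simpa using PySem.List.pyGet?_ofNat (s0 :: s1 :: s2 :: s3 :: a :: rest) 3 (by simp)
        rw [e2, e3]
        rfl
      rw [hsq]
      rw [show PySem.List.pyGet? ([s0, s1, s2, s3] : List Int) 0 = some s0 from rfl,
          show PySem.List.pyGet? ([s0, s1, s2, s3] : List Int) 1 = some s1 from rfl,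
          beq_some, beq_some]
      simp [hs0, hs1]
    rw [hAval, hBval]
    simp
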